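-- pv_equiv track=rewrite | github.com/RafeedIqbal/id8 | backend/app/orchestrator/handlers/write_code.py | _infer_entry_point
-- ===== SOURCE A (Python) =====
-- def _infer_entry_point(file_paths: list[str]) -> str:
--     path_set = set(file_paths)
--
--     for candidate in (
--         "app/page.tsx",
--         "app/page.jsx",
--         "frontend/src/main.tsx",
--         "frontend/src/main.jsx",
--         "frontend/src/pages/index.tsx",
--         "frontend/src/pages/index.jsx",
--         "frontend/src/app/page.tsx",
--         "frontend/src/app/page.jsx",
--         "src/main.tsx",
--         "src/main.jsx",
--         "src/pages/index.tsx",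
--         "src/pages/index.jsx",
--         "src/app/page.tsx",
--         "src/app/page.jsx",
--         "frontend/index.html",
--         "index.html",
--     ):
--         if candidate in path_set:
--             return candidate
--
--     if file_paths:
--         return sorted(file_paths)[0]
--     return "app/page.tsx"
-- ===== SOURCE B (Python) =====
-- _CANDIDATES = (
--     "app/page.tsx",
--     "app/page.jsx",
--     "frontend/src/main.tsx",
--     "frontend/src/main.jsx",
--     "frontend/src/pages/index.tsx",
--     "frontend/src/pages/index.jsx",
--     "frontend/src/app/page.tsx",
--     "frontend/src/app/page.jsx",
--     "src/main.tsx",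
--     "src/main.jsx",
--     "src/pages/index.tsx",
--     "src/pages/index.jsx",
--     "src/app/page.tsx",
--     "src/app/page.jsx",
--     "frontend/index.html",
--     "index.html",
-- )
--
--
-- def _infer_entry_point(file_paths: list[str]) -> str:
--     rank = {path: i for i, path in enumerate(_CANDIDATES)}
--     best = None  # (path, rank) with the smallest rank seen so far; first occurrence wins
--     for f in file_paths:
--         r = rank.get(f)
--         if r is None:
--             continue
--         if best is None or r < best[1]:
--             best = (f, r)
--     if best is not None:
--         return best[0]
--     if file_paths:
--         return min(file_paths)
--     return "app/page.tsx"
-- ===== Notes on version B (the rewrite author's own statement) =====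
-- stated objective: alternative
-- what changed: B inverts the loop: it precomputes a path->priority-rank dict once and makes a single pass over file_paths tracking the candidate with the smallest rank, instead of scanning the fixed candidate list in priority order against a set of the inputs; the fallback uses min(file_paths) instead of sorted(file_paths)[0].
import Mathlib
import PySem

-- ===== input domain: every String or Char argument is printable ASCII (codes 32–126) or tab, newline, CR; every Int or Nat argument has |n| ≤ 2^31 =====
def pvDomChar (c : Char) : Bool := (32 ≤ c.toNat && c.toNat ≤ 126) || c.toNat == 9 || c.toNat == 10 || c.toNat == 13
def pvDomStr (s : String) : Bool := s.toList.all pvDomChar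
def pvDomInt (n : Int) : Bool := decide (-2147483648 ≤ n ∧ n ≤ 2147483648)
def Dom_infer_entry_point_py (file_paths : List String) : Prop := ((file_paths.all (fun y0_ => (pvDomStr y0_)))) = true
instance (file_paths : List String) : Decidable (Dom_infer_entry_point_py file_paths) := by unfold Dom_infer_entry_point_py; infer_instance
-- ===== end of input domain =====

-- B inverts A's loop: one pass over file_paths against a precomputed path→rank dict,
-- tracking the smallest-rank candidate, instead of scanning the candidate list in
-- priority order against a set of the inputs (objective: alternative, same cost).

-- ===== PORT A =====
def pvCandidates : List String :=
  [ "app/page.tsx", "app/page.jsx",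
    "frontend/src/main.tsx", "frontend/src/main.jsx",
    "frontend/src/pages/index.tsx", "frontend/src/pages/index.jsx",
    "frontend/src/app/page.tsx", "frontend/src/app/page.jsx",
    "src/main.tsx", "src/main.jsx",
    "src/pages/index.tsx", "src/pages/index.jsx",
    "src/app/page.tsx", "src/app/page.jsx",
    "frontend/index.html", "index.html" ]

-- the 'for candidate in (...): if candidate in path_set: return candidate' loop
def pvFindCandidate : List String → PySem.Set String → Option String
  | [], _ => none
  | c :: rest, s => if c ∈ s then some c else pvFindCandidate rest s

def infer_entry_point_py (file_paths : List String) : String :=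
  let pathSet : PySem.Set String := PySem.Set.ofList file_paths
  match pvFindCandidate pvCandidates pathSet with
  | some c => c
  | none =>
      if file_paths.isEmpty then "app/page.tsx"
      else PySem.List.pyGetD (PySem.List.sorted file_paths (fun x => x) false) 0 ""

-- ===== PORT B =====
-- rank = {path: i for i, path in enumerate(_CANDIDATES)}
def pvRank : PySem.Dict String Int :=
  (PySem.List.enumerate pvCandidates 0).foldl (fun d p => d.insert p.2 p.1) PySem.Dict.empty

-- the single pass: best = (path, rank) with the smallest rank seen, first wins
def pvStep (acc : Option (String × Int)) (f : String) : Option (String × Int) :=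
  match PySem.Dict.get? pvRank f with
  | none => acc
  | some r =>
      match acc with
      | none => some (f, r)
      | some (b, br) => if r < br then some (f, r) else some (b, br)

def infer_entry_point_py_alt (file_paths : List String) : String :=
  match file_paths.foldl pvStep none with
  | some (b, _) => b
  | none =>
      if file_paths.isEmpty then "app/page.tsx"
      else (PySem.List.min? file_paths (fun y => y)).getD ""

-- ===== PRECONDITION & SPEC =====
def Spec_infer_entry_point_py (file_paths : List String) (out : String) : Prop := out = infer_entry_point_py_alt file_paths
instance (file_paths : List String) (out : String) : Decidable (Spec_infer_entry_point_py file_paths out) := by unfold Spec_infer_entry_point_py; infer_instance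

-- ===== CLAIM (what is proved, stated in full; the proofs are below) =====
def Claim_equal_infer_entry_point_py : Prop := ∀ (file_paths : List String), Dom_infer_entry_point_py file_paths → Spec_infer_entry_point_py file_paths (infer_entry_point_py file_paths)

-- ===== LEMMAS AND PROOFS =====

-- the ranked-candidate association pairs underlying pvRank
def pvPairs : List (String × Int) :=
  [ ("app/page.tsx", 0), ("app/page.jsx", 1),
    ("frontend/src/main.tsx", 2), ("frontend/src/main.jsx", 3),
    ("frontend/src/pages/index.tsx", 4), ("frontend/src/pages/index.jsx", 5),
    ("frontend/src/app/page.tsx", 6), ("frontend/src/app/page.jsx", 7),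
    ("src/main.tsx", 8), ("src/main.jsx", 9),
    ("src/pages/index.tsx", 10), ("src/pages/index.jsx", 11),
    ("src/app/page.tsx", 12), ("src/app/page.jsx", 13),
    ("frontend/index.html", 14), ("index.html", 15) ]

theorem pvRank_eq : pvRank = PySem.Dict.mk pvPairs := by decide

-- lookup of x in an association list, paired with x
def pvLook : List (String × Int) → String → Option (String × Int)
  | [], _ => none
  | (c, r) :: rest, x => if x == c then some (x, r) else pvLook rest x

-- left-biased min-by-rank
def pvMerge : Option (String × Int) → Option (String × Int) → Option (String × Int)
  | none, m => m
  | some p, none => some p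
  | some p, some q => if q.2 < p.2 then some q else some p

-- first pair whose path occurs in fps
def pvChain : List (String × Int) → List String → Option (String × Int)
  | [], _ => none
  | (c, r) :: rest, fps => if c ∈ fps then some (c, r) else pvChain rest fps

theorem pvLook_eq (ps : List (String × Int)) (x : String) :
    pvLook ps x = (PySem.Dict.get? (PySem.Dict.mk ps) x).map (fun r => (x, r)) := by
  induction ps with
  | nil => rfl
  | cons p rest ih =>
      obtain ⟨c, r⟩ := p
      rw [PySem.Dict.get?_mk_cons]
      by_cases h : c = x
      · subst h; simp [pvLook]
      · have h1 : (x == c) = false := by simp [Ne.symm h]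
        have h2 : (c == x) = false := by simp [h]
        simp [pvLook, h1, h2, ih]

theorem pvLook_rank_mem (ps : List (String × Int)) (x : String) (p : String × Int)
    (h : pvLook ps x = some p) : p.2 ∈ ps.map (·.2) := by
  induction ps with
  | nil => simp [pvLook] at h
  | cons q rest ih =>
      obtain ⟨c, r⟩ := q
      by_cases hx : x == c
      · simp [pvLook, hx] at h
        simp [← h]
      · simp [pvLook, hx] at h
        simp [ih h]

theorem pvStep_eq (acc : Option (String × Int)) (f : String) :
    pvStep acc f = pvMerge acc (pvLook pvPairs f) := by
  rw [pvLook_eq, ← pvRank_eq]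
  unfold pvStep
  cases h : PySem.Dict.get? pvRank f with
  | none => cases acc <;> simp [pvMerge]
  | some r => cases acc with
    | none => simp [pvMerge]
    | some p => obtain ⟨b, br⟩ := p; simp [pvMerge]

theorem pvMerge_assoc (a b c : Option (String × Int)) :
    pvMerge (pvMerge a b) c = pvMerge a (pvMerge b c) := by
  cases a with
  | none => cases b <;> cases c <;> simp [pvMerge]
  | some p => cases b with
    | none => cases c <;> simp [pvMerge]
    | some q => cases c with
      | none => simp only [pvMerge]; split_ifs <;> rfl
      | some s =>
          simp only [pvMerge]
          by_cases h1 : q.2 < p.2 <;> by_cases h2 : s.2 < q.2 <;> by_cases h3 : s.2 < p.2 <;>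
            simp [h1, h2, h3] <;> omega

theorem pvFoldl_merge (xs : List String) (acc : Option (String × Int)) :
    xs.foldl pvStep acc = pvMerge acc (xs.foldl pvStep none) := by
  induction xs generalizing acc with
  | nil => cases acc <;> simp [pvMerge]
  | cons x xs ih =>
      simp only [List.foldl_cons]
      rw [ih (pvStep acc x), ih (pvStep none x), pvStep_eq acc x, pvStep_eq none x]
      have : pvMerge none (pvLook pvPairs x) = pvLook pvPairs x := by
        cases h : pvLook pvPairs x <;> simp [pvMerge]
      rw [this, pvMerge_assoc]

-- heart of the proof: cons on the input side is min-merge against the chain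
theorem pvChain_cons (ps : List (String × Int))
    (hp : ps.Pairwise (fun p q => p.2 < q.2)) (x : String) (xs : List String) :
    pvChain ps (x :: xs) = pvMerge (pvLook ps x) (pvChain ps xs) := by
  induction ps with
  | nil => simp [pvChain, pvLook, pvMerge]
  | cons q rest ih =>
      obtain ⟨c, r⟩ := q
      rw [List.pairwise_cons] at hp
      obtain ⟨hlt, hrest⟩ := hp
      by_cases hx : x = c
      · subst hx
        have hmem : x ∈ x :: xs := List.mem_cons_self ..
        by_cases hxs : x ∈ xs
        · simp [pvChain, pvLook, hmem, hxs, pvMerge]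
        · simp only [pvChain, pvLook, if_pos hmem, if_neg hxs, beq_self_eq_true, if_pos]
          cases hc : pvChain rest xs with
          | none => simp [pvMerge]
          | some p =>
              have hp2 : r < p.2 := by
                have : p.2 ∈ rest.map (·.2) := by
                  clear ih hrest hlt
                  induction rest with
                  | nil => simp [pvChain] at hc
                  | cons w t iht =>
                      obtain ⟨cw, rw⟩ := w
                      by_cases hw : cw ∈ xs
                      · simp [pvChain, hw] at hc; simp [← hc]
                      · simp [pvChain, hw] at hc; simp [iht hc]
                rw [List.mem_map] at this
                obtain ⟨b, hb, hb2⟩ := this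
                have := hlt b hb
                omega
              simp [pvMerge, not_lt.mpr (le_of_lt hp2)]
      · have hxc : (x == c) = false := by simp [hx]
        have hmemiff : (c ∈ x :: xs) ↔ (c ∈ xs) := by
          simp [List.mem_cons, Ne.symm hx]
        by_cases hcs : c ∈ xs
        · have hcm : c ∈ x :: xs := hmemiff.mpr hcs
          simp only [pvChain, pvLook, if_pos hcm, if_pos hcs, hxc, Bool.false_eq_true]
          cases hl : pvLook rest x with
          | none => simp [pvMerge]
          | some p =>
              have hp2 : r < p.2 := by
                have := pvLook_rank_mem rest x p hl
                rw [List.mem_map] at this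
                obtain ⟨b, hb, hb2⟩ := this
                have := hlt b hb
                omega
              simp [pvMerge, hp2]
        · have hcm : c ∉ x :: xs := fun h => hcs (hmemiff.mp h)
          simp only [pvChain, pvLook, if_neg hcm, if_neg hcs,
            if_neg (by simp [hx] : ¬ (x == c) = true)]
          exact ih hrest

set_option maxHeartbeats 1000000 in
theorem pvPairs_pairwise : pvPairs.Pairwise (fun p q => p.2 < q.2) := by
  simp [pvPairs, List.pairwise_cons]

-- B's fold computes the first candidate (in rank order) occurring in fps
theorem pvFold_eq_chain (fps : List String) :
    fps.foldl pvStep none = pvChain pvPairs fps := by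
  induction fps with
  | nil => decide
  | cons x xs ih =>
      rw [List.foldl_cons, pvFoldl_merge, ih]
      have h0 : pvStep none x = pvLook pvPairs x := by
        rw [pvStep_eq]; cases h : pvLook pvPairs x <;> simp [pvMerge]
      rw [h0, pvChain_cons pvPairs pvPairs_pairwise]

-- A's candidate scan is the same chain, forgetting the rank
theorem pvFind_eq_chain_gen (ps : List (String × Int)) (fps : List String) :
    pvFindCandidate (ps.map (·.1)) (PySem.Set.ofList fps) = (pvChain ps fps).map (·.1) := by
  induction ps with
  | nil => rfl
  | cons q rest ih =>
      obtain ⟨c, r⟩ := q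
      simp only [List.map_cons, pvFindCandidate, pvChain]
      by_cases h : c ∈ fps
      · rw [if_pos ((PySem.Set.mem_ofList fps c).mpr h), if_pos h]; rfl
      · rw [if_neg (fun hh => h ((PySem.Set.mem_ofList fps c).mp hh)), if_neg h, ih]

theorem pvCandidates_eq_map : pvCandidates = pvPairs.map (·.1) := by rfl

theorem pvFind_eq_chain (fps : List String) :
    pvFindCandidate pvCandidates (PySem.Set.ofList fps) = (pvChain pvPairs fps).map (·.1) := by
  rw [pvCandidates_eq_map]; exact pvFind_eq_chain_gen pvPairs fps

-- the fallback: sorted(fps)[0] = min(fps) on a non-empty list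
theorem pvSortedHead_eq_min (fps : List String) (h : ¬ fps.isEmpty) :
    PySem.List.pyGetD (PySem.List.sorted fps (fun x => x) false) 0 "" =
      (PySem.List.min? fps (fun y => y)).getD "" := by
  have hne : fps ≠ [] := by simpa [List.isEmpty_iff] using h
  cases hs : PySem.List.sorted fps (fun x => x) false with
  | nil => exact absurd ((PySem.List.sorted_eq_nil_iff fps (fun x => x) false).mp hs) hne
  | cons hd tl =>
      cases hm : PySem.List.min? fps (fun y => y) with
      | none => exact absurd ((PySem.List.min?_eq_none_iff fps (fun y => y)).mp hm) hne
      | some m =>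
          have h1 : PySem.List.pyGetD (hd :: tl) 0 "" = hd := by
            simp [PySem.List.pyGetD, PySem.List.pyGet?, PySem.List.pyIdx?]
          rw [h1, Option.getD_some]
          have hdm : hd ∈ fps := (PySem.List.mem_sorted fps (fun x => x) false hd).mp (hs ▸ List.mem_cons_self ..)
          have hmf : m ∈ fps := PySem.List.min?_mem hm
          have h2 : hd ≤ m := PySem.List.key_head_sorted_le fps (fun x => x) hs m hmf
          have h3 : m ≤ hd := PySem.List.min?_isMin hm hd hdm
          exact le_antisymm h2 h3

-- ===== VERDICT (by name: the statement is the Claim_ definition above) =====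
theorem infer_entry_point_py_spec : Claim_equal_infer_entry_point_py := by
  intro fps _
  unfold Spec_infer_entry_point_py infer_entry_point_py infer_entry_point_py_alt
  show (match pvFindCandidate pvCandidates (PySem.Set.ofList fps) with
        | some c => c
        | none =>
            if fps.isEmpty then "app/page.tsx"
            else PySem.List.pyGetD (PySem.List.sorted fps (fun x => x) false) 0 "") = _
  rw [pvFind_eq_chain, pvFold_eq_chain]
  cases h : pvChain pvPairs fps with
  | some p => obtain ⟨c, r⟩ := p; rfl
  | none =>
      simp only [Option.map_none]
      by_cases he : fps.isEmpty
      · simp [he]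
      · simp only [if_neg he]
        exact pvSortedHead_eq_min fps he
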